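-- pv_equiv track=rewrite | github.com/John-Yoder/Holdem-Poker-AI | poker/helpers/texture.py | _has_4_to_straight
-- ===== SOURCE A (Python) =====
-- from typing import Dict, Iterable, List, Union
--
-- def _has_4_to_straight(vals: List[int]) -> bool:
--     uniq = sorted(set(vals))
--     if 14 in uniq:
--         uniq = [1] + uniq
--     for start in uniq:
--         window = [x for x in uniq if start <= x <= start + 4]
--         if len(window) >= 4:
--             return True
--     return False
-- ===== SOURCE B (Python) =====
-- def _has_4_to_straight(vals):
--     ranks = list(set(vals))
--     if 14 in ranks:
--         ranks.append(1)
--     ranks.sort()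
--     return any(hi - lo <= 4 for lo, hi in zip(ranks, ranks[3:]))
-- ===== Notes on version B (the rewrite author's own statement) =====
-- stated objective: faster
-- what changed: Replaces the per-start comprehension scan (for each value, re-filter the whole unique list) by one sort followed by a single linear pass comparing each element with the one three positions later.
import Mathlib
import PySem

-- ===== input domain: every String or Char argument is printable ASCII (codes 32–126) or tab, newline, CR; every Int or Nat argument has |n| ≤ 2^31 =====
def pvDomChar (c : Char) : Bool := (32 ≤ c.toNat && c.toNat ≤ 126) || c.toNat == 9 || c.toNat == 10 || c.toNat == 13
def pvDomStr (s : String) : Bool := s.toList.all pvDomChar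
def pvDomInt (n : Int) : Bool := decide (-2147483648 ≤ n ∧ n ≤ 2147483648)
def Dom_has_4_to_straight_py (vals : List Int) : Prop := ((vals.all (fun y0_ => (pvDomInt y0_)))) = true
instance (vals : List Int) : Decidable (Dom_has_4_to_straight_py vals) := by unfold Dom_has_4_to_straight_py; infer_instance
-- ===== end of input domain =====

-- B replaces A's per-start filter scan by sort + one linear pass over consecutive quadruples (faster).

-- ===== PORT A =====
-- 'for start in uniq: window = [x for x in uniq if start <= x <= start+4]; if len(window) >= 4: return True' / 'return False'
def pyA_loop (all : List Int) : List Int → Bool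
  | [] => false
  | s :: rest =>
    if 4 ≤ (all.filter (fun x => decide (s ≤ x ∧ x ≤ s + 4))).length then true
    else pyA_loop all rest

def has_4_to_straight_py (vals : List Int) : Bool :=
  let uniq0 := PySem.List.sorted (PySem.Set.ofList vals) (fun x => x) false
  let uniq := if (14 : Int) ∈ uniq0 then 1 :: uniq0 else uniq0
  pyA_loop uniq uniq

-- ===== PORT B =====
-- ranks = list(set(vals)); if 14 in ranks: ranks.append(1); ranks.sort();
-- any(hi - lo <= 4 for lo, hi in zip(ranks, ranks[3:]))
def has_4_to_straight_py_alt (vals : List Int) : Bool :=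
  let ranks0 := PySem.Set.ofList vals
  let ranks1 := if (14 : Int) ∈ ranks0 then ranks0 ++ [1] else ranks0
  let arr := PySem.List.sorted ranks1 (fun x => x) false
  (arr.zip (arr.drop 3)).any (fun p => decide (p.2 - p.1 ≤ 4))

-- ===== PRECONDITION & SPEC =====
def Spec_has_4_to_straight_py (vals : List Int) (out : Bool) : Prop := out = has_4_to_straight_py_alt vals
instance (vals : List Int) (out : Bool) : Decidable (Spec_has_4_to_straight_py vals out) := by unfold Spec_has_4_to_straight_py; infer_instance

-- ===== CLAIM (what is proved, stated in full; the proofs are below) =====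
def Claim_equal_has_4_to_straight_py : Prop := ∀ (vals : List Int), Dom_has_4_to_straight_py vals → Spec_has_4_to_straight_py vals (has_4_to_straight_py vals)

-- ===== LEMMAS AND PROOFS =====

-- A's loop is an existential over start values
theorem pyA_loop_eq_true {all l : List Int} :
    pyA_loop all l = true ↔
      ∃ s ∈ l, 4 ≤ (all.filter (fun x => decide (s ≤ x ∧ x ≤ s + 4))).length := by
  induction l with
  | nil => simp [pyA_loop]
  | cons s rest ih =>
    simp only [pyA_loop, List.mem_cons]
    split_ifs with h
    · simp only [true_iff]
      exact ⟨s, Or.inl rfl, h⟩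
    · rw [ih]
      constructor
      · rintro ⟨t, ht, hc⟩; exact ⟨t, Or.inr ht, hc⟩
      · rintro ⟨t, (rfl | ht), hc⟩
        · exact absurd hc h
        · exact ⟨t, ht, hc⟩

-- B's pass is an existential over window start indices
theorem alt_pass_eq_true {arr : List Int} :
    ((arr.zip (arr.drop 3)).any (fun p => decide (p.2 - p.1 ≤ 4)) = true) ↔
      ∃ i, ∃ h : i + 3 < arr.length, arr[i + 3] - arr[i] ≤ 4 := by
  rw [List.any_eq_true]
  constructor
  · rintro ⟨x, hx, hp⟩
    obtain ⟨i, hi, rfl⟩ := List.mem_iff_getElem.1 hx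
    have hi' : i + 3 < arr.length := by
      simp [List.length_zip, List.length_drop] at hi; omega
    refine ⟨i, hi', ?_⟩
    have := hp
    simp only [List.getElem_zip, List.getElem_drop, decide_eq_true_eq] at this
    simpa only [show 3 + i = i + 3 from by omega] using this
  · rintro ⟨i, h, hle⟩
    have hz : i < (arr.zip (arr.drop 3)).length := by
      simp [List.length_zip, List.length_drop]; omega
    refine ⟨(arr.zip (arr.drop 3))[i], List.getElem_mem hz, ?_⟩
    simp only [List.getElem_zip, List.getElem_drop, decide_eq_true_eq]
    simpa only [show 3 + i = i + 3 from by omega] using hle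

-- a ≤-sorted list is monotone in its indices
theorem mono_getElem {arr : List Int} (hs : arr.Pairwise (· ≤ ·)) {p q : Nat}
    (hpq : p ≤ q) (hq : q < arr.length) : arr[p]'(by omega) ≤ arr[q] := by
  rcases Nat.lt_or_ge p q with h | h
  · exact (List.pairwise_iff_getElem.1 hs) p q (by omega) hq h
  · have : p = q := by omega
    subst this; exact le_refl _

-- core equivalence on a ≤-sorted list: some start value covers ≥ 4 elements iff
-- some element and the one three positions later differ by ≤ 4
theorem window_iff {arr : List Int} (hs : arr.Pairwise (· ≤ ·)) :
    (∃ s ∈ arr, 4 ≤ (arr.filter (fun x => decide (s ≤ x ∧ x ≤ s + 4))).length) ↔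
      ∃ i, ∃ h : i + 3 < arr.length, arr[i + 3] - arr[i] ≤ 4 := by
  constructor
  · rintro ⟨s, hmem, hc⟩
    set P : Int → Bool := fun x => decide (s ≤ x ∧ x ≤ s + 4) with hP
    set l := arr.filter P with hl
    have hsub : l.Sublist arr := List.filter_sublist
    obtain ⟨f, hf⟩ := List.sublist_iff_exists_fin_orderEmbedding_get_eq.1 hsub
    have h4 : 4 ≤ l.length := hc
    have f01 : (f ⟨0, by omega⟩ : ℕ) < (f ⟨1, by omega⟩ : ℕ) := f.strictMono (by simp)
    have f12 : (f ⟨1, by omega⟩ : ℕ) < (f ⟨2, by omega⟩ : ℕ) := f.strictMono (by simp)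
    have f23 : (f ⟨2, by omega⟩ : ℕ) < (f ⟨3, by omega⟩ : ℕ) := f.strictMono (by simp)
    set i : ℕ := ((f ⟨0, by omega⟩ : Fin arr.length) : ℕ) with hi
    set j : ℕ := ((f ⟨3, by omega⟩ : Fin arr.length) : ℕ) with hj
    have hij : i + 3 ≤ j := by omega
    have hjn : j < arr.length := (f ⟨3, by omega⟩).isLt
    have hli : arr[i]'(by omega) = l.get ⟨0, by omega⟩ := (hf ⟨0, by omega⟩).symm
    have hlj : arr[j] = l.get ⟨3, by omega⟩ := (hf ⟨3, by omega⟩).symm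
    have hp0 : P (l.get ⟨0, by omega⟩) = true := List.of_mem_filter (List.get_mem l _)
    have hp3 : P (l.get ⟨3, by omega⟩) = true := List.of_mem_filter (List.get_mem l _)
    rw [hP] at hp0 hp3
    simp only [decide_eq_true_eq] at hp0 hp3
    refine ⟨i, by omega, ?_⟩
    have h1 : arr[i + 3]'(by omega) ≤ arr[j] := mono_getElem hs hij hjn
    have h2 : s ≤ arr[i]'(by omega) := by rw [hli]; exact hp0.1
    have h3 : arr[j] ≤ s + 4 := by rw [hlj]; exact hp3.2
    omega
  · rintro ⟨i, h, hle⟩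
    refine ⟨arr[i]'(by omega), List.getElem_mem (by omega), ?_⟩
    set s := arr[i]'(by omega) with hsdef
    set P : Int → Bool := fun x => decide (s ≤ x ∧ x ≤ s + 4) with hP
    set w := (arr.drop i).take 4 with hw
    have hwsub : w.Sublist arr := (List.take_sublist 4 _).trans (List.drop_sublist i arr)
    have hwlen : w.length = 4 := by
      simp [hw, List.length_take, List.length_drop]; omega
    have hall : ∀ x ∈ w, P x = true := by
      intro x hx
      obtain ⟨k, hk, rfl⟩ := List.mem_iff_getElem.1 hx
      have hk4 : k < 4 := by omega
      have hwk : w[k] = arr[i + k]'(by omega) := by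
        simp [hw, List.getElem_take, List.getElem_drop]
      rw [hwk, hP]
      simp only [decide_eq_true_eq]
      constructor
      · exact mono_getElem hs (by omega) (by omega)
      · have : arr[i + k]'(by omega) ≤ arr[i + 3]'(by omega) :=
          mono_getElem hs (by omega) (by omega)
        omega
    have hwc : (w.filter P).length = 4 := by
      rw [← List.countP_eq_length_filter, List.countP_eq_length.2 hall, hwlen]
    have : w.countP P ≤ arr.countP P := hwsub.countP_le
    rw [List.countP_eq_length_filter, List.countP_eq_length_filter] at this
    omega

-- the per-start condition is permutation invariant
theorem exists_perm {l1 l2 : List Int} (h : l1.Perm l2) :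
    (∃ s ∈ l1, 4 ≤ (l1.filter (fun x => decide (s ≤ x ∧ x ≤ s + 4))).length) ↔
      ∃ s ∈ l2, 4 ≤ (l2.filter (fun x => decide (s ≤ x ∧ x ≤ s + 4))).length := by
  constructor
  · rintro ⟨s, hm, hc⟩
    exact ⟨s, h.mem_iff.1 hm, by rwa [← (h.filter _).length_eq]⟩
  · rintro ⟨s, hm, hc⟩
    exact ⟨s, h.mem_iff.2 hm, by rwa [(h.filter _).length_eq]⟩

-- A's start list is a permutation of B's sorted array
theorem perm_lists (S : List Int) :
    (if (14 : Int) ∈ PySem.List.sorted S (fun x => x) false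
       then 1 :: PySem.List.sorted S (fun x => x) false
       else PySem.List.sorted S (fun x => x) false).Perm
    (PySem.List.sorted (if (14 : Int) ∈ S then S ++ [1] else S) (fun x => x) false) := by
  have hmem : ((14 : Int) ∈ PySem.List.sorted S (fun x => x) false) ↔ (14 : Int) ∈ S :=
    PySem.List.mem_sorted S (fun x => x) false 14
  by_cases h : (14 : Int) ∈ S
  · rw [if_pos (hmem.2 h), if_pos h]
    have p1 : (PySem.List.sorted S (fun x => x) false).Perm S := PySem.List.sorted_perm S (fun x => x) false
    have p2 : (PySem.List.sorted (S ++ [1]) (fun x => x) false).Perm (S ++ [1]) :=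
      PySem.List.sorted_perm (S ++ [1]) (fun x => x) false
    have p3 : (1 :: S).Perm (S ++ [1]) := by
      simpa using (List.perm_append_comm (l₁ := [1]) (l₂ := S))
    exact ((p1.cons 1).trans p3).trans p2.symm
  · rw [if_neg (fun hc => h (hmem.1 hc)), if_neg h]

-- ===== VERDICT (by name: the statement is the Claim_ definition above) =====
theorem has_4_to_straight_py_spec : Claim_equal_has_4_to_straight_py := by
  intro vals _
  unfold Spec_has_4_to_straight_py has_4_to_straight_py has_4_to_straight_py_alt
  set S := PySem.Set.ofList vals with hS
  set uniqA := (if (14 : Int) ∈ PySem.List.sorted S (fun x => x) false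
      then 1 :: PySem.List.sorted S (fun x => x) false
      else PySem.List.sorted S (fun x => x) false) with huA
  set arr := PySem.List.sorted (if (14 : Int) ∈ S then S ++ [1] else S) (fun x => x) false
    with harr
  show pyA_loop uniqA uniqA = (arr.zip (arr.drop 3)).any (fun p => decide (p.2 - p.1 ≤ 4))
  have hpair : arr.Pairwise (· ≤ ·) := PySem.List.sorted_pairwise _ (fun x => x)
  have hiff : pyA_loop uniqA uniqA = true ↔
      ((arr.zip (arr.drop 3)).any (fun p => decide (p.2 - p.1 ≤ 4)) = true) := by
    rw [pyA_loop_eq_true, exists_perm (perm_lists S), window_iff hpair, alt_pass_eq_true]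
  cases hA : pyA_loop uniqA uniqA with
  | true => exact (hiff.1 hA).symm
  | false =>
    cases hB : (arr.zip (arr.drop 3)).any (fun p => decide (p.2 - p.1 ≤ 4)) with
    | true => exact absurd (hiff.2 hB) (by simp [hA])
    | false => rfl
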